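-- pv_equiv track=rewrite | github.com/Scrince/Arculus_Recovery | Arculus_BTC_Recovery.py | normalize_path
-- ===== SOURCE A (Python) =====
-- from typing import Dict, List, Tuple
--
-- HARDENED = 0x80000000
--
-- def parse_path(path: str) -> List[int]:
--     if not path:
--         return []
--     elems = path.strip().split("/")
--     if elems[0] == "m":
--         elems = elems[1:]
--     out = []
--     for e in elems:
--         if e == "":
--             continue
--         hardened = False
--         if e.endswith("'") or e.endswith("h") or e.endswith("H"):
--             hardened = True
--             e = e[:-1]
--         i = int(e)
--         if i < 0 or i >= HARDENED:
--             raise ValueError(f"invalid path index: {i}")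
--         if hardened:
--             i |= HARDENED
--         out.append(i)
--     return out
--
-- def normalize_path(path: str) -> str:
--     ints = parse_path(path)
--     if not ints:
--         return "m"
--     parts = []
--     for i in ints:
--         parts.append(f"{i - HARDENED}'" if (i & HARDENED) else str(i))
--     return "m/" + "/".join(parts)
-- ===== SOURCE B (Python) =====
-- def _fmt(e: str) -> str:
--     suffix = "'" if e[-1] in "'hH" else ""
--     i = int(e[:-1] if suffix else e)
--     if not 0 <= i < 0x80000000:
--         raise ValueError(f"invalid path index: {i}")
--     return str(i) + suffix
--
--
-- def normalize_path(path: str) -> str: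
--     # filter/map pipeline: format each element directly, no encoded int list.
--     if not path:
--         return "m"
--     elems = path.strip().split("/")
--     body = elems[elems[0] == "m":]
--     parts = [_fmt(e) for e in body if e]
--     return "m/" + "/".join(parts) if parts else "m"
-- ===== Notes on version B (the rewrite author's own statement) =====
-- stated objective: simpler
-- what changed: B replaces A's two staged passes (parse every element into a HARDENED-bit-encoded integer list, then decode that list back into strings) by a single filter/map pipeline whose per-element formatter goes straight from the parsed int to its output string, eliminating the intermediate encoded representation.
import Mathlib
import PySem

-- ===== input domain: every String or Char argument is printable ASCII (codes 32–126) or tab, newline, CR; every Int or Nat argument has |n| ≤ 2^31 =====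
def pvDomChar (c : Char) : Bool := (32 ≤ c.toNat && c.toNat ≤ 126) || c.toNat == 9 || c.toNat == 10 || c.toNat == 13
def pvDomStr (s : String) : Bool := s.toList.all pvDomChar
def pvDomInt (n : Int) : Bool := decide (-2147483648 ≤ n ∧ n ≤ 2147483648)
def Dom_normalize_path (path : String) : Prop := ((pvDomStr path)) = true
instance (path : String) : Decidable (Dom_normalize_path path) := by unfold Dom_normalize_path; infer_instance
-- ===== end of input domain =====

-- B replaces A's two staged passes (parse to a HARDENED-bit-encoded int list, then decode
-- it back into strings) by a filter/map pipeline formatting each element directly; objective: simpler.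

-- ===== PORT A =====

-- loop of parse_path over the elements; `none` = ValueError (outside Pre_).
-- `i |= HARDENED` is ported as `i + 2147483648`, exact here since 0 ≤ i < 2^31.
def pvA_parse : List String → Option (List Int)
  | [] => some []
  | e :: rest =>
    if e = "" then pvA_parse rest
    else
      let hardened := PySem.Str.endswith e "'" || PySem.Str.endswith e "h" || PySem.Str.endswith e "H"
      let e' := if hardened then PySem.Str.slice e none (some (-1)) else e   -- e[:-1]
      match PySem.Int.ofStr? e' with
      | none => none                                   -- int(e) raised ValueError
      | some i =>
        if i < 0 ∨ 2147483648 ≤ i then none            -- raise ValueError(f"invalid path index: {i}")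
        else (pvA_parse rest).map (fun t => (if hardened then i + 2147483648 else i) :: t)

-- parse_path; split? is some since the separator "/" is nonempty (.getD [] never applies)
def pv_parse_path (path : String) : Option (List Int) :=
  if path = "" then some []
  else
    let elems := (PySem.Str.split? (PySem.Str.strip path) "/").getD []
    let elems := if elems[0]? = some "m" then elems.drop 1 else elems   -- elems = elems[1:]
    pvA_parse elems

-- `f"{i - HARDENED}'" if (i & HARDENED) else str(i)`; the truthiness test `i & HARDENED`
-- is ported as `2147483648 ≤ i`, exact since parse_path only yields i ∈ [0, 2^32).
def pvDecodeA (i : Int) : String :=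
  if 2147483648 ≤ i then PySem.Int.toStr (i - 2147483648) ++ "'" else PySem.Int.toStr i

def normalize_path (path : String) : String :=
  match pv_parse_path path with
  | none => ""                                        -- parse_path raised (excluded by Pre_)
  | some [] => "m"
  | some ints => "m/" ++ PySem.Str.join "/" (ints.map pvDecodeA)

-- ===== PORT B =====

-- _fmt of Source B: one element straight to its output string; none = the ValueError paths.
-- `e[-1] in "'hH"` reads the last char; `e[:-1]` drops it (e is nonempty when called).
def pvFmt? (e : String) : Option String :=
  let hard : Bool := e.toList.getLast? == some '\'' || e.toList.getLast? == some 'h'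
                       || e.toList.getLast? == some 'H'
  match PySem.Int.ofStr? (if hard then String.ofList e.toList.dropLast else e) with
  | none => none                                      -- int() raised ValueError
  | some i =>
    if 0 ≤ i ∧ i < 2147483648 then some (PySem.Int.toStr i ++ (if hard then "'" else ""))
    else none                                         -- raise ValueError(f"invalid path index: {i}")

def normalize_path_alt (path : String) : String :=
  if path = "" then "m"
  else
    let elems := (PySem.Str.split? (PySem.Str.strip path) "/").getD []   -- sep "/" ≠ "", some
    let body := elems.drop (if elems[0]? = some "m" then 1 else 0)       -- elems[elems[0]=="m":]
    match (body.filter (fun e => e ≠ "")).mapM pvFmt? with               -- [_fmt(e) for e in body if e]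
    | none => ""                                      -- Source B raised (excluded by Pre_)
    | some parts =>
      if parts = [] then "m"                          -- `if parts` truthiness
      else "m/" ++ PySem.Str.join "/" parts

-- ===== PRECONDITION & SPEC =====

-- a nonempty element is acceptable iff, after removing a trailing hardened marker,
-- int() parses it to a value in [0, 2^31)
def pvSegOK (e : String) : Bool :=
  e == "" ||
    (match PySem.Int.ofStr?
        (if PySem.Str.endswith e "'" || PySem.Str.endswith e "h" || PySem.Str.endswith e "H"
         then PySem.Str.slice e none (some (-1)) else e) with
     | none => false
     | some i => decide (0 ≤ i ∧ i < 2147483648))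

-- Pre_ excludes exactly the inputs on which A raises ValueError: some element of the
-- path fails int() or parses to a value outside [0, 2^31).
def Pre_normalize_path (path : String) : Prop :=
  (path == "" ||
    (((PySem.Str.split? (PySem.Str.strip path) "/").getD []).drop
       (if ((PySem.Str.split? (PySem.Str.strip path) "/").getD [])[0]? = some "m" then 1 else 0)).all
      pvSegOK) = true
instance (path : String) : Decidable (Pre_normalize_path path) := by
  unfold Pre_normalize_path; infer_instance

def pvWitness_normalize_path : String := "m/44'/0h/1H//2"

def Spec_normalize_path (path : String) (out : String) : Prop := out = normalize_path_alt path
instance (path : String) (out : String) : Decidable (Spec_normalize_path path out) := by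
  unfold Spec_normalize_path; infer_instance

-- ===== CLAIM (what is proved, stated in full; the proofs are below) =====
def Claim_equal_normalize_path : Prop := ∀ (path : String), Dom_normalize_path path → Pre_normalize_path path → Spec_normalize_path path (normalize_path path)

-- ===== LEMMAS AND PROOFS =====

-- a singleton suffix is exactly "last char is c"
theorem pv_last_suffix (l : List Char) (c : Char) : l.getLast? = some c ↔ [c] <:+ l := by
  constructor
  · intro h
    rcases List.getLast?_eq_some_iff.mp h with ⟨l', rfl⟩
    exact ⟨l', rfl⟩
  · rintro ⟨l', rfl⟩
    simp

-- endswith with a one-char suffix reads the last character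
theorem pv_ends_one (e : String) (c : Char) (hc : (String.ofList [c]).toList = [c]) :
    PySem.Str.endswith e (String.ofList [c]) = (e.toList.getLast? == some c) := by
  rw [Bool.eq_iff_iff, beq_iff_eq]
  rw [PySem.Str.endswith_eq, hc, PySem.Chars.endswith_iff]
  exact (pv_last_suffix e.toList c).symm

-- B's filter/map pipeline computes A's parse followed by A's per-element decode
theorem pvB_eq_A (elems : List String) :
    (elems.filter (fun e => e ≠ "")).mapM pvFmt? = (pvA_parse elems).map (List.map pvDecodeA) := by
  induction elems with
  | nil => rfl
  | cons e rest ih =>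
    by_cases he : e = ""
    · simpa [pvA_parse, he] using ih
    · have hq : PySem.Str.endswith e "'" = (e.toList.getLast? == some '\'') :=
        pv_ends_one e '\'' rfl
      have hh : PySem.Str.endswith e "h" = (e.toList.getLast? == some 'h') :=
        pv_ends_one e 'h' rfl
      have hH : PySem.Str.endswith e "H" = (e.toList.getLast? == some 'H') :=
        pv_ends_one e 'H' rfl
      have hslice : PySem.Str.slice e none (some (-1)) = String.ofList e.toList.dropLast := by
        apply String.toList_inj.mp
        simp [PySem.List.slice_to_neg_one]
      have hfil : (e :: rest).filter (fun x => x ≠ "") = e :: rest.filter (fun x => x ≠ "") := by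
        simp [he]
      rw [hfil, List.mapM_cons]
      simp only [pvA_parse, if_neg he, pvFmt?, hq, hh, hH, hslice]
      set hard := (e.toList.getLast? == some '\'' || e.toList.getLast? == some 'h'
                    || e.toList.getLast? == some 'H') with hhard
      cases hp : PySem.Int.ofStr? (if hard = true then String.ofList e.toList.dropLast else e) with
      | none => simp
      | some i =>
        by_cases hr : i < 0 ∨ 2147483648 ≤ i
        · simp [hr, show ¬ (0 ≤ i ∧ i < 2147483648) from by omega]
        · cases hA : pvA_parse rest with
          | none =>
            have h2 := ih
            rw [hA] at h2
            simp only [ne_eq, decide_not] at h2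
            simp [hr, h2, show (0 ≤ i ∧ i < 2147483648) from by omega]
          | some t =>
            have h2 := ih
            rw [hA] at h2
            simp only [ne_eq, decide_not] at h2
            cases hhd : hard with
            | false =>
              simp [h2, pvDecodeA, show (0 ≤ i ∧ i < 2147483648) from by omega,
                show ¬ (2147483648:Int) ≤ i from by omega]
            | true =>
              simp [h2, pvDecodeA, show (0 ≤ i ∧ i < 2147483648) from by omega,
                show (2147483648:Int) ≤ i + 2147483648 from by omega,
                show i + 2147483648 - 2147483648 = i from by omega]

-- ===== VERDICT (by name: the statement is the Claim_ definition above) =====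
theorem normalize_path_spec : Claim_equal_normalize_path := by
  intro path _ _
  unfold Spec_normalize_path normalize_path normalize_path_alt pv_parse_path
  by_cases hp : path = ""
  · simp [hp]
  · simp only [if_neg hp, pvB_eq_A]
    by_cases hm : ((PySem.Str.split? (PySem.Str.strip path) "/").getD [])[0]? = some "m"
    · simp only [if_pos hm]
      cases pvA_parse (((PySem.Str.split? (PySem.Str.strip path) "/").getD []).drop 1) with
      | none => rfl
      | some l => cases l with
        | nil => rfl
        | cons x t => rfl
    · simp only [if_neg hm, List.drop_zero]
      cases pvA_parse ((PySem.Str.split? (PySem.Str.strip path) "/").getD []) with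
      | none => rfl
      | some l => cases l with
        | nil => rfl
        | cons x t => rfl
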